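-- pv_equiv track=rewrite | github.com/NagarjunK98/DSA | geeksforgeeks/1.2_pointer_approach/13.remove_and_reverse.py | removeReverse
-- ===== SOURCE A (Python) =====
-- def removeReverse(S):
--     from collections import Counter
--
--     counter = Counter(S)
--     l = list(S)
--     i = 0
--     while i < len(l):
--         if counter[l[i]] > 1:
--             counter[l[i]] -= 1
--             l.remove(l[i])
--             l = l[::-1]
--             i = 0
--         else:
--             i+=1
--     return "".join(l)
-- ===== SOURCE B (Python) =====
-- def removeReverse(S):
--     # Two-pointer scan with frequency counts and reversal parity: O(n) instead of A's repeated remove+reverse.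
--     from collections import Counter
--     cnt = Counter(S)
--     left = []    # kept (count-1) chars collected scanning left-to-right
--     right = []   # kept chars collected scanning right-to-left
--     i, j = 0, len(S) - 1
--     forward = True
--     removals = 0
--     while i <= j:
--         if forward:
--             c = S[i]; i += 1
--             if cnt[c] > 1:
--                 cnt[c] -= 1; removals += 1; forward = False
--             else:
--                 left.append(c)
--         else:
--             c = S[j]; j -= 1
--             if cnt[c] > 1:
--                 cnt[c] -= 1; removals += 1; forward = True
--             else:
--                 right.append(c)
--     res = left + right[::-1]
--     if removals % 2 == 1:
--         res.reverse()
--     return "".join(res)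
-- ===== Notes on version B (the rewrite author's own statement) =====
-- stated objective: faster
-- what changed: Replaces A's simulation that repeatedly rescans, removes the first duplicated character and reverses the whole list (quadratic list surgery) by a single two-pointer pass over the string that tracks character counts and reversal parity, assembling the result once at the end.
import Mathlib
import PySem

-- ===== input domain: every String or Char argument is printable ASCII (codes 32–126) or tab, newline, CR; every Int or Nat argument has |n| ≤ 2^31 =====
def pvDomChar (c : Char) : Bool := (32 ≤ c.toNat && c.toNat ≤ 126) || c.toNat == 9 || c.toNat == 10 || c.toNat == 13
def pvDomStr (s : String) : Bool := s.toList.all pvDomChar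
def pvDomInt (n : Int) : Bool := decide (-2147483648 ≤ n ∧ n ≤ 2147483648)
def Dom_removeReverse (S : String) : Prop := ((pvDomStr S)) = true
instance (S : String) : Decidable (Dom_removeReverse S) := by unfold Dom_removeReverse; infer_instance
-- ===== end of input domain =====

-- B replaces A's repeated remove-first-duplicate-then-reverse list surgery by a single
-- two-pointer pass tracking character counts and reversal parity (objective: faster).

-- ===== PORT A =====
-- A's while loop: state (l, counter, i); condition counter[l[i]] > 1, then
-- counter[l[i]] -= 1; l.remove(l[i]); l = l[::-1] (= reverse, PySem.List.slice?_none_none_neg_one); i = 0; else i += 1.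
def pvrLoopA (l : List Char) (cnt : PySem.Dict Char Int) (i : Nat) : List Char :=
  if h : i < l.length then
    if cnt.getD l[i] 0 > 1 then
      -- l.remove(l[i]) never raises here since l[i] ∈ l; .getD l is only a totality guard
      pvrLoopA ((PySem.List.remove? l l[i]).getD l).reverse
        (cnt.insert l[i] (cnt.getD l[i] 0 - 1)) 0
    else
      pvrLoopA l cnt (i + 1)
  else l
termination_by (l.length, l.length - i)
decreasing_by
  · left
    have hm : l[i] ∈ l := List.getElem_mem h
    have he : PySem.List.remove? l l[i] = some (l.erase l[i]) :=
      PySem.List.remove?_eq_some_erase l l[i] hm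
    rw [he]
    have h1 := List.length_erase_of_mem hm
    have h2 := List.length_pos_of_mem hm
    simp [h1]
    omega
  · right; omega

def removeReverse (S : String) : String :=
  String.ofList (pvrLoopA S.toList (PySem.Dict.counter S.toList) 0)   -- "".join(l)

-- ===== PORT B =====
-- B's while loop: state (cnt, left, right, i, j, forward, removals); k here is j + 1
-- (so `i <= j` is `i < k`); c = S[i] / S[j] is inlined (always in range while the loop
-- runs: List.getD's default is only a totality guard).
def pvrLoopB (l : List Char) (cnt : PySem.Dict Char Int) (left right : List Char)
    (i k : Nat) (forward : Bool) (removals : Nat) : List Char × Nat :=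
  if _h : i < k then
    if forward then
      if cnt.getD (l.getD i ' ') 0 > 1 then
        pvrLoopB l (cnt.insert (l.getD i ' ') (cnt.getD (l.getD i ' ') 0 - 1))
          left right (i + 1) k false (removals + 1)
      else
        pvrLoopB l cnt (left ++ [l.getD i ' ']) right (i + 1) k true removals
    else
      if cnt.getD (l.getD (k - 1) ' ') 0 > 1 then
        pvrLoopB l (cnt.insert (l.getD (k - 1) ' ') (cnt.getD (l.getD (k - 1) ' ') 0 - 1))
          left right i (k - 1) true (removals + 1)
      else
        pvrLoopB l cnt left (right ++ [l.getD (k - 1) ' ']) i (k - 1) false removals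
  else (left ++ right.reverse, removals)   -- res = left + right[::-1]
termination_by k - i

def removeReverse_alt (S : String) : String :=
  let r := pvrLoopB S.toList (PySem.Dict.counter S.toList) [] [] 0 S.toList.length true 0
  String.ofList (if r.2 % 2 == 1 then r.1.reverse else r.1)

-- ===== PRECONDITION & SPEC =====
def Spec_removeReverse (S : String) (out : String) : Prop := out = removeReverse_alt S
instance (S : String) (out : String) : Decidable (Spec_removeReverse S out) := by unfold Spec_removeReverse; infer_instance

-- ===== CLAIM (what is proved, stated in full; the proofs are below) =====
def Claim_equal_removeReverse : Prop := ∀ (S : String), Dom_removeReverse S → Spec_removeReverse S (removeReverse S)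

-- ===== LEMMAS AND PROOFS =====

-- Abstract process both loops implement: repeatedly erase the first character that still
-- occurs more than once, reversing after each erasure.
def pvFirstDup (l : List Char) : Option Nat := l.findIdx? (fun c => l.count c > 1)

theorem pvFirstDup_lt {l : List Char} {idx : Nat} (h : pvFirstDup l = some idx) : idx < l.length := by
  unfold pvFirstDup at h
  exact (List.findIdx?_eq_some_iff_findIdx_eq.mp h).1

def pvP (l : List Char) : List Char :=
  match h : pvFirstDup l with
  | none => l
  | some idx => pvP ((l.eraseIdx idx).reverse)
termination_by l.length
decreasing_by
  have h1 := pvFirstDup_lt h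
  simp [List.length_eraseIdx, h1]
  omega

def pvRevIf (r : Nat) (xs : List Char) : List Char := if r % 2 = 1 then xs.reverse else xs

theorem pvP_none {l : List Char} (h : pvFirstDup l = none) : pvP l = l := by
  rw [pvP]
  split <;> simp_all

theorem pvP_some {l : List Char} {idx : Nat} (h : pvFirstDup l = some idx) :
    pvP l = pvP ((l.eraseIdx idx).reverse) := by
  rw [pvP]
  split <;> simp_all

theorem pvFindIdx?_append_cons {α : Type} (p : α → Bool) (xs : List α) (c : α) (ys : List α)
    (hxs : ∀ x ∈ xs, ¬ p x) (hc : p c) :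
    List.findIdx? p (xs ++ c :: ys) = some xs.length := by
  induction xs with
  | nil => simp [List.findIdx?_cons, hc]
  | cons x rest ih =>
    have hx : ¬ p x := hxs x (by simp)
    simp [List.findIdx?_cons, hx, ih (fun y hy => hxs y (by simp [hy]))]

theorem pvFirstDup_none {l : List Char} (h : ∀ x ∈ l, l.count x ≤ 1) : pvFirstDup l = none := by
  unfold pvFirstDup
  rw [List.findIdx?_eq_none_iff]
  intro x hx
  simpa using Nat.not_lt.mpr (h x hx)

theorem pvFirstDup_append_cons (xs : List Char) (c : Char) (ys : List Char)
    (hxs : ∀ x ∈ xs, (xs ++ c :: ys).count x ≤ 1) (hc : (xs ++ c :: ys).count c > 1) :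
    pvFirstDup (xs ++ c :: ys) = some xs.length := by
  unfold pvFirstDup
  apply pvFindIdx?_append_cons
  · intro x hx
    simpa using Nat.not_lt.mpr (hxs x hx)
  · simpa using hc

theorem pvEraseIdx_append_cons {α : Type} (xs : List α) (c : α) (ys : List α) :
    (xs ++ c :: ys).eraseIdx xs.length = xs ++ ys := by
  induction xs with
  | nil => simp
  | cons x rest ih => simp [ih]

theorem pvP_revIf_of_unique (r : Nat) (M : List Char) (h : ∀ x ∈ M, M.count x ≤ 1) :
    pvP (pvRevIf r M) = pvRevIf r M := by
  unfold pvRevIf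
  split
  · exact pvP_none (pvFirstDup_none (by
      intro x hx
      rw [List.count_reverse]
      exact h x (List.mem_reverse.mp hx)))
  · exact pvP_none (pvFirstDup_none h)

-- A's loop computes pvP, given that the counter mirrors the list's counts and the prefix
-- before i contains no duplicated character.
theorem pvLoopA_eq (l : List Char) (cnt : PySem.Dict Char Int) (i : Nat) :
    (∀ c, cnt.getD c 0 = (l.count c : Int)) →
    i ≤ l.length →
    (∀ m (hm : m < i) (h2 : m < l.length), l.count l[m] ≤ 1) →
    pvrLoopA l cnt i = pvP l := by
  induction l, cnt, i using pvrLoopA.induct with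
  | case1 l cnt i h hgt ih =>
    intro hcnt hi hpre
    obtain ⟨x, hx⟩ : ∃ x, l[i] = x := ⟨_, rfl⟩
    rw [hx] at hgt ih
    have hm : x ∈ l := hx ▸ List.getElem_mem h
    have he : PySem.List.remove? l x = some (l.erase x) :=
      PySem.List.remove?_eq_some_erase l x hm
    have hcg : 1 < l.count x := by have := hcnt x; omega
    have hnotin : x ∉ l.take i := by
      intro hmem
      rw [List.mem_take_iff_getElem] at hmem
      obtain ⟨m, hm2, hme⟩ := hmem
      have hcc := hpre m (by omega) (by omega)
      rw [hme] at hcc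
      omega
    have hsplit : l = l.take i ++ x :: l.drop (i + 1) := by
      conv_lhs => rw [← List.take_append_drop i l, List.drop_eq_getElem_cons h]
      rw [hx]
    have herase : l.erase x = l.take i ++ l.drop (i + 1) := by
      conv_lhs => rw [hsplit]
      rw [List.erase_append_right _ hnotin, List.erase_cons_head]
    have hmemled : ∀ y ∈ l.take i, l.count y ≤ 1 := by
      intro y hy
      rw [List.mem_take_iff_getElem] at hy
      obtain ⟨m, hm2, hme⟩ := hy
      have := hpre m (by omega) (by omega)
      rw [hme] at this
      exact this
    have hlen : (l.take i).length = i := by rw [List.length_take]; omega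
    have hfd : pvFirstDup l = some i := by
      have h1 := pvFirstDup_append_cons (l.take i) x (l.drop (i + 1))
        (by intro y hy; rw [← hsplit]; exact hmemled y hy)
        (by rw [← hsplit]; exact hcg)
      rw [← hsplit, hlen] at h1
      exact h1
    have hstep : pvP l = pvP ((l.take i ++ l.drop (i + 1)).reverse) := by
      rw [pvP_some hfd]
      have he2 := pvEraseIdx_append_cons (l.take i) x (l.drop (i + 1))
      rw [hlen, ← hsplit] at he2
      rw [he2]
    have hrelx : l.count x = (l.take i ++ l.drop (i + 1)).count x + 1 := by
      conv_lhs => rw [hsplit]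
      simp only [List.count_append, List.count_cons_self]
      omega
    have hrelne : ∀ y, y ≠ x → l.count y = (l.take i ++ l.drop (i + 1)).count y := by
      intro y hy
      conv_lhs => rw [hsplit]
      simp only [List.count_append, List.count_cons_of_ne (Ne.symm hy)]
    rw [pvrLoopA, dif_pos h, hx, if_pos hgt, he]
    simp only [Option.getD_some]
    rw [herase, hstep]
    simp only [he, Option.getD_some, herase] at ih
    apply ih
    · intro y
      rw [PySem.Dict.getD_insert, List.count_reverse]
      split_ifs with hy
      · subst hy
        rw [hcnt]
        omega
      · rw [hcnt, hrelne y hy]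
    · simp
    · intro m hm2 h2; omega
  | case2 l cnt i h hle ih =>
    intro hcnt hi hpre
    rw [pvrLoopA, dif_pos h, if_neg hle]
    apply ih
    · exact hcnt
    · omega
    · intro m hm2 h2
      by_cases hmi : m < i
      · exact hpre m hmi h2
      · have hme : m = i := by omega
        subst hme
        have := hcnt l[m]
        omega
  | case3 l cnt i h =>
    intro hcnt hi hpre
    rw [pvrLoopA, dif_neg h]
    have hall : ∀ y ∈ l, l.count y ≤ 1 := by
      intro y hy
      rw [List.mem_iff_getElem] at hy
      obtain ⟨m, hm2, hme⟩ := hy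
      have := hpre m (by omega) hm2
      rw [hme] at this
      exact this
    rw [pvP_none (pvFirstDup_none hall)]

-- B's loop computes pvP of the current virtual string (left, the unscanned middle
-- S[i..j], and right reversed), up to the pending reversal parity.
theorem pvLoopB_eq (l : List Char) (cnt : PySem.Dict Char Int) (left right : List Char)
    (i k : Nat) (forward : Bool) (removals : Nat) :
    k ≤ l.length → i ≤ k →
    forward = decide (removals % 2 = 0) →
    (∀ c, cnt.getD c 0 = (((left ++ (l.drop i).take (k - i)) ++ right.reverse).count c : Int)) →
    (∀ c, (c ∈ left ∨ c ∈ right) →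
      ((left ++ (l.drop i).take (k - i)) ++ right.reverse).count c ≤ 1) →
    pvP (pvRevIf removals ((left ++ (l.drop i).take (k - i)) ++ right.reverse)) =
      pvRevIf (pvrLoopB l cnt left right i k forward removals).2
              (pvrLoopB l cnt left right i k forward removals).1 := by
  induction cnt, left, right, i, k, forward, removals using pvrLoopB.induct with
  | l => exact l
  | case1 cnt left right i k removals hlt hgt0 ih =>
    intro hk hik hfwd hcnt huniq
    have hil : i < l.length := by omega
    have hgd : l.getD i ' ' = l[i] := List.getD_eq_getElem l ' ' hil
    have hgt : cnt.getD l[i] 0 > 1 := by rw [hgd] at hgt0; exact hgt0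
    have hreven : removals % 2 = 0 := of_decide_eq_true hfwd.symm
    have hmid : (l.drop i).take (k - i) = l[i] :: (l.drop (i + 1)).take (k - (i + 1)) := by
      rw [List.drop_eq_getElem_cons hil, show k - i = (k - (i + 1)) + 1 from by omega,
        List.take_succ_cons]
    have hM : (left ++ (l.drop i).take (k - i)) ++ right.reverse
        = left ++ l[i] :: ((l.drop (i + 1)).take (k - (i + 1)) ++ right.reverse) := by
      rw [hmid]; simp
    have hrelx : ((left ++ (l.drop i).take (k - i)) ++ right.reverse).count l[i]
        = ((left ++ (l.drop (i + 1)).take (k - (i + 1))) ++ right.reverse).count l[i] + 1 := by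
      simp only [hM, List.count_append, List.count_cons_self]
      omega
    have hrelne : ∀ y, y ≠ l[i] → ((left ++ (l.drop i).take (k - i)) ++ right.reverse).count y
        = ((left ++ (l.drop (i + 1)).take (k - (i + 1))) ++ right.reverse).count y := by
      intro y hy
      rw [hM]
      simp only [List.count_append, List.count_cons_of_ne (Ne.symm hy)]
      omega
    have hcg : 1 < ((left ++ (l.drop i).take (k - i)) ++ right.reverse).count l[i] := by
      have := hcnt l[i]; omega
    have hstepB : pvrLoopB l cnt left right i k true removals
        = pvrLoopB l (cnt.insert (l.getD i ' ') (cnt.getD (l.getD i ' ') 0 - 1))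
            left right (i + 1) k false (removals + 1) := by
      rw [pvrLoopB, dif_pos hlt, if_pos rfl, if_pos hgt0]
    have hfd : pvFirstDup (left ++ l[i] :: ((l.drop (i + 1)).take (k - (i + 1)) ++ right.reverse))
        = some left.length := by
      apply pvFirstDup_append_cons
      · intro y hy; rw [← hM]; exact huniq y (Or.inl hy)
      · rw [← hM]; exact hcg
    have hih := ih hk (by omega)
      (by
        have h1 : (removals + 1) % 2 = 1 := by omega
        simp [h1])
      (by
        intro y
        rw [hgd, PySem.Dict.getD_insert]
        split_ifs with hy
        · rw [hy, hcnt]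
          omega
        · rw [hcnt, hrelne y hy])
      (by
        intro y hy
        have h1 := huniq y hy
        by_cases hyc : y = l[i]
        · subst hyc; omega
        · rw [← hrelne y hyc]; exact h1)
    have hodd : pvRevIf (removals + 1)
        ((left ++ (l.drop (i + 1)).take (k - (i + 1))) ++ right.reverse)
        = ((left ++ (l.drop (i + 1)).take (k - (i + 1))) ++ right.reverse).reverse := by
      unfold pvRevIf; rw [if_pos (by omega)]
    unfold pvRevIf
    rw [if_neg (by omega), hM, pvP_some hfd, pvEraseIdx_append_cons, hstepB]
    rw [hodd] at hih
    rw [show left ++ ((l.drop (i + 1)).take (k - (i + 1)) ++ right.reverse)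
        = (left ++ (l.drop (i + 1)).take (k - (i + 1))) ++ right.reverse from by simp]
    exact hih
  | case2 cnt left right i k removals hlt hle ih =>
    intro hk hik hfwd hcnt huniq
    have hil : i < l.length := by omega
    have hgd : l.getD i ' ' = l[i] := List.getD_eq_getElem l ' ' hil
    have hmid : (l.drop i).take (k - i) = l[i] :: (l.drop (i + 1)).take (k - (i + 1)) := by
      rw [List.drop_eq_getElem_cons hil, show k - i = (k - (i + 1)) + 1 from by omega,
        List.take_succ_cons]
    have hlist : ((left ++ [l.getD i ' ']) ++ (l.drop (i + 1)).take (k - (i + 1))) ++ right.reverse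
        = (left ++ (l.drop i).take (k - i)) ++ right.reverse := by
      rw [hgd, hmid]; simp
    have hstepB : pvrLoopB l cnt left right i k true removals
        = pvrLoopB l cnt (left ++ [l.getD i ' ']) right (i + 1) k true removals := by
      rw [pvrLoopB, dif_pos hlt, if_pos rfl, if_neg hle]
    have hih := ih hk (by omega) hfwd
      (by intro y; rw [hlist]; exact hcnt y)
      (by
        intro y hy
        rw [hlist]
        rcases hy with hy | hy
        · rcases List.mem_append.mp hy with hy2 | hy2
          · exact huniq y (Or.inl hy2)
          · have hy3 : y = l[i] := by
              have h5 := List.mem_singleton.mp hy2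
              rw [h5, hgd]
            subst hy3
            have h4 := hcnt l[i]
            rw [hgd] at hle
            omega
        · exact huniq y (Or.inr hy))
    rw [hstepB, ← hih, hlist]
  | case3 cnt left right i k forward removals hlt hnf hgt0 ih =>
    intro hk hik hfwd hcnt huniq
    have hf : forward = false := by revert hnf; cases forward <;> simp
    subst hf
    have hkl : k - 1 < l.length := by omega
    have hgd : l.getD (k - 1) ' ' = l[k - 1] := List.getD_eq_getElem l ' ' hkl
    have hgt : cnt.getD l[k - 1] 0 > 1 := by rw [hgd] at hgt0; exact hgt0
    have hrodd : removals % 2 = 1 := by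
      rcases Nat.mod_two_eq_zero_or_one removals with h0 | h1
      · exfalso; rw [h0] at hfwd; simp at hfwd
      · exact h1
    have hmid : (l.drop i).take (k - i) = (l.drop i).take (k - 1 - i) ++ [l[k - 1]] := by
      rw [show k - i = (k - 1 - i) + 1 from by omega, List.take_add_one]
      congr 1
      rw [List.getElem?_drop, show i + (k - 1 - i) = k - 1 from by omega,
        List.getElem?_eq_getElem hkl]
      rfl
    have hMrev : ((left ++ (l.drop i).take (k - i)) ++ right.reverse).reverse
        = right ++ l[k - 1] :: (((l.drop i).take (k - 1 - i)).reverse ++ left.reverse) := by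
      rw [hmid]; simp
    have hrelx : ((left ++ (l.drop i).take (k - i)) ++ right.reverse).count l[k - 1]
        = ((left ++ (l.drop i).take (k - 1 - i)) ++ right.reverse).count l[k - 1] + 1 := by
      simp only [hmid, List.count_append, List.count_cons_self, List.count_nil]
      omega
    have hrelne : ∀ y, y ≠ l[k - 1] → ((left ++ (l.drop i).take (k - i)) ++ right.reverse).count y
        = ((left ++ (l.drop i).take (k - 1 - i)) ++ right.reverse).count y := by
      intro y hy
      simp only [hmid, List.count_append, List.count_cons_of_ne (Ne.symm hy), List.count_nil]
      omega
    have hcg : 1 < ((left ++ (l.drop i).take (k - i)) ++ right.reverse).count l[k - 1] := by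
      have := hcnt l[k - 1]; omega
    have hstepB : pvrLoopB l cnt left right i k false removals
        = pvrLoopB l
            (cnt.insert (l.getD (k - 1) ' ') (cnt.getD (l.getD (k - 1) ' ') 0 - 1))
            left right i (k - 1) true (removals + 1) := by
      rw [pvrLoopB, dif_pos hlt, if_neg Bool.false_ne_true, if_pos hgt0]
    have hfd : pvFirstDup (right ++ l[k - 1] :: (((l.drop i).take (k - 1 - i)).reverse ++ left.reverse))
        = some right.length := by
      apply pvFirstDup_append_cons
      · intro y hy
        rw [← hMrev, List.count_reverse]
        exact huniq y (Or.inr hy)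
      · rw [← hMrev, List.count_reverse]
        exact hcg
    have hih := ih (by omega) (by omega)
      (by
        have h1 : (removals + 1) % 2 = 0 := by omega
        simp [h1])
      (by
        intro y
        rw [hgd, PySem.Dict.getD_insert]
        split_ifs with hy
        · rw [hy, hcnt]
          omega
        · rw [hcnt, hrelne y hy])
      (by
        intro y hy
        have h1 := huniq y hy
        by_cases hyc : y = l[k - 1]
        · subst hyc; omega
        · rw [← hrelne y hyc]; exact h1)
    have heven : pvRevIf (removals + 1)
        ((left ++ (l.drop i).take (k - 1 - i)) ++ right.reverse)
        = (left ++ (l.drop i).take (k - 1 - i)) ++ right.reverse := by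
      unfold pvRevIf; rw [if_neg (by omega)]
    unfold pvRevIf
    rw [if_pos hrodd, hMrev, pvP_some hfd, pvEraseIdx_append_cons, hstepB]
    rw [heven] at hih
    rw [show (right ++ (((l.drop i).take (k - 1 - i)).reverse ++ left.reverse)).reverse
        = (left ++ (l.drop i).take (k - 1 - i)) ++ right.reverse from by simp]
    exact hih
  | case4 cnt left right i k forward removals hlt hnf hle ih =>
    intro hk hik hfwd hcnt huniq
    have hf : forward = false := by revert hnf; cases forward <;> simp
    subst hf
    have hkl : k - 1 < l.length := by omega
    have hgd : l.getD (k - 1) ' ' = l[k - 1] := List.getD_eq_getElem l ' ' hkl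
    have hmid : (l.drop i).take (k - i) = (l.drop i).take (k - 1 - i) ++ [l[k - 1]] := by
      rw [show k - i = (k - 1 - i) + 1 from by omega, List.take_add_one]
      congr 1
      rw [List.getElem?_drop, show i + (k - 1 - i) = k - 1 from by omega,
        List.getElem?_eq_getElem hkl]
      rfl
    have hlist : (left ++ (l.drop i).take (k - 1 - i)) ++ (right ++ [l.getD (k - 1) ' ']).reverse
        = (left ++ (l.drop i).take (k - i)) ++ right.reverse := by
      rw [hgd, hmid]; simp
    have hstepB : pvrLoopB l cnt left right i k false removals
        = pvrLoopB l cnt left (right ++ [l.getD (k - 1) ' ']) i (k - 1) false removals := by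
      rw [pvrLoopB, dif_pos hlt, if_neg Bool.false_ne_true, if_neg hle]
    have hih := ih (by omega) (by omega) hfwd
      (by intro y; rw [hlist]; exact hcnt y)
      (by
        intro y hy
        rw [hlist]
        rcases hy with hy | hy
        · exact huniq y (Or.inl hy)
        · rcases List.mem_append.mp hy with hy2 | hy2
          · exact huniq y (Or.inr hy2)
          · have hy3 : y = l[k - 1] := by
              have h5 := List.mem_singleton.mp hy2
              rw [h5, hgd]
            subst hy3
            have h4 := hcnt l[k - 1]
            rw [hgd] at hle
            omega)
    rw [hstepB, ← hih, hlist]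
  | case5 cnt left right i k forward removals hnlt =>
    intro hk hik hfwd hcnt huniq
    have h0 : k - i = 0 := by omega
    simp only [h0, List.take_zero, List.append_nil] at huniq ⊢
    have hout : pvrLoopB l cnt left right i k forward removals
        = (left ++ right.reverse, removals) := by
      rw [pvrLoopB, dif_neg hnlt]
    rw [hout]
    exact pvP_revIf_of_unique removals (left ++ right.reverse) (by
      intro y hy
      rcases List.mem_append.mp hy with hy2 | hy2
      · exact huniq y (Or.inl hy2)
      · exact huniq y (Or.inr (List.mem_reverse.mp hy2)))

-- ===== VERDICT (by name: the statement is the Claim_ definition above) =====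
theorem removeReverse_spec : Claim_equal_removeReverse := by
  intro S _
  unfold Spec_removeReverse removeReverse removeReverse_alt
  have hA : pvrLoopA S.toList (PySem.Dict.counter S.toList) 0 = pvP S.toList := by
    apply pvLoopA_eq
    · intro c; simp [PySem.Dict.getD_counter]
    · exact Nat.zero_le _
    · intro m hm h2; omega
  have hB := pvLoopB_eq S.toList (PySem.Dict.counter S.toList) [] [] 0 S.toList.length true 0
    (le_refl _) (Nat.zero_le _) (by simp)
    (by
      intro c
      rw [PySem.Dict.getD_counter]
      simp only [List.nil_append, List.reverse_nil, List.append_nil, List.drop_zero,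
        Nat.sub_zero, List.take_length])
    (by intro c hc; simp at hc)
  simp only [List.nil_append, List.append_nil, List.reverse_nil, List.drop_zero,
    Nat.sub_zero, List.take_length] at hB
  have hB0 : pvRevIf 0 S.toList = S.toList := by unfold pvRevIf; rw [if_neg (by omega)]
  rw [hB0] at hB
  rw [hA, hB]
  by_cases hpar : (pvrLoopB S.toList (PySem.Dict.counter S.toList) [] [] 0 S.toList.length true 0).2 % 2 = 1
  · simp [pvRevIf]
  · simp [pvRevIf]
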